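-- pv_equiv track=rewrite | github.com/linzhiqiu/leco | setups.py | get_superclass_to_subclass
-- ===== SOURCE A (Python) =====
-- def get_superclass_to_subclass(leaf_idx_to_all_class_idx):
--     # superclass_to_subclass[sub_class_time][super_class_time][super_class_idx]
--     # is the set of indices in sub_class_time that correspond to the superclass
--     num_of_levels = len(leaf_idx_to_all_class_idx[list(leaf_idx_to_all_class_idx.keys())[0]])
--     superclass_to_subclass = {}
--     for tp_idx in range(num_of_levels-1, -1, -1):
--         superclass_to_subclass[tp_idx] = {}
--         for super_class_time in range(tp_idx+1):
--             superclass_to_subclass[tp_idx][super_class_time] = {}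
--             for leaf_idx in leaf_idx_to_all_class_idx:
--                 sub_class_idx = leaf_idx_to_all_class_idx[leaf_idx][tp_idx]
--                 super_class_idx = leaf_idx_to_all_class_idx[leaf_idx][super_class_time]
--                 if not super_class_idx in superclass_to_subclass[tp_idx][super_class_time]:
--                     superclass_to_subclass[tp_idx][super_class_time][super_class_idx] = [sub_class_idx]
--                 elif not sub_class_idx in superclass_to_subclass[tp_idx][super_class_time][super_class_idx]:
--                     superclass_to_subclass[tp_idx][super_class_time][super_class_idx].append(sub_class_idx)
--     return superclass_to_subclass
-- ===== SOURCE B (Python) =====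
-- def get_superclass_to_subclass(leaf_idx_to_all_class_idx):
--     # two-stage: (1) for each level, partition the leaf vectors by their class at
--     # that level (one grouping pass per level, reused by every cell); (2) assemble
--     # each cell from the precomputed partition, deduping the subclass column of a
--     # group with dict.fromkeys instead of A's per-element list-membership scans.
--     vecs = list(leaf_idx_to_all_class_idx.values())
--     num_of_levels = len(vecs[0])
--     groups = []
--     for st in range(num_of_levels):
--         g = {}
--         for v in vecs:
--             g.setdefault(v[st], []).append(v)
--         groups.append(g)
--     return {tp: {st: {k: list(dict.fromkeys(v[tp] for v in grp))
--                       for k, grp in groups[st].items()}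
--                  for st in range(tp + 1)}
--             for tp in range(num_of_levels - 1, -1, -1)}
-- ===== Notes on version B (the rewrite author's own statement) =====
-- stated objective: faster
-- what changed: Replaces A's per-cell single pass that grows each cell dict with list-membership-tested inserts/appends by a two-stage algorithm: one grouping pass per level partitions the leaf vectors by their class (reused by every cell of that superclass level), and each cell is then assembled by a comprehension that dedups a group's subclass column with dict.fromkeys.
-- outside the precondition, e.g. on get_superclass_to_subclass({}): A raises IndexError, B raises IndexError; on get_superclass_to_subclass({1: [0, 0], 2: [0]}): A raises IndexError, B raises IndexError
import Mathlib
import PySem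

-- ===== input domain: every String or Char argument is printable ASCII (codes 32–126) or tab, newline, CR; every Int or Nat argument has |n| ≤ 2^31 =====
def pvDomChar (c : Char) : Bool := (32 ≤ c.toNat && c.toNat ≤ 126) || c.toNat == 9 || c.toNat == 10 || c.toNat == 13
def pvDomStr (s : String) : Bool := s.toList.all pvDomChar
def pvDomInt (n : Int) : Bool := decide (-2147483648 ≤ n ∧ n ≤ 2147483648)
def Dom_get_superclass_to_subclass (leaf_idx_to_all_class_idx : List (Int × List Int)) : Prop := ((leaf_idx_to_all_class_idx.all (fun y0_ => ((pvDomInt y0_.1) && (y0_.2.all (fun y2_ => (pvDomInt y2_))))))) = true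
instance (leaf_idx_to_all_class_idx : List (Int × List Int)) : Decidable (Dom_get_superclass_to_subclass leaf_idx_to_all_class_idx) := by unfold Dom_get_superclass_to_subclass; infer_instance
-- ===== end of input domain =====

-- B replaces A's per-cell incremental dict-building pass by a two-stage algorithm:
-- one partition of the leaf vectors per level, reused by every cell; different decomposition.

-- first-match lookup / first-match overwrite on an assoc list (the dict reading of
-- List (Int × β)); used by both ports' dict updates
def alGet {β : Type} : List (Int × β) → Int → Option β
  | [], _ => none
  | p :: r, k => if p.1 = k then some p.2 else alGet r k

def alSet {β : Type} : List (Int × β) → Int → β → List (Int × β)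
  | [], _, _ => []
  | p :: r, k, v => if p.1 = k then (k, v) :: r else p :: alSet r k v

-- ===== PORT A =====
-- one update of an inner cell dict: 'if key absent insert [sub]; elif sub absent append'
def cellStepA (cell : List (Int × List Int)) (sup sub : Int) : List (Int × List Int) :=
  match alGet cell sup with
  | none => cell ++ [(sup, [sub])]
  | some b => if sub ∈ b then cell else alSet cell sup (b ++ [sub])

def get_superclass_to_subclass (leaf_idx_to_all_class_idx : List (Int × List Int)) : List (Int × List (Int × List (Int × List Int))) :=
  match leaf_idx_to_all_class_idx with
  | [] => []   -- Python raises IndexError here; excluded by Pre_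
  | p :: _ =>
    let L : Int := (p.2.length : Int)
    (PySem.List.pyRange (L - 1) (-1) (-1)).foldl (fun acc tp =>
      acc ++ [(tp, (PySem.List.pyRange 0 (tp + 1) 1).foldl (fun acc2 st =>
        acc2 ++ [(st, leaf_idx_to_all_class_idx.foldl (fun cell q =>
          cellStepA cell (PySem.List.pyGetD q.2 st 0) (PySem.List.pyGetD q.2 tp 0)) [])]) [])]) []

-- ===== PORT B =====
-- stage-1 step: 'g.setdefault(v[st], []).append(v)'
def groupStep (g : List (Int × List (List Int))) (c : Int) (v : List Int) : List (Int × List (List Int)) :=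
  match alGet g c with
  | none => g ++ [(c, [v])]
  | some l => alSet g c (l ++ [v])

def get_superclass_to_subclass_alt (leaf_idx_to_all_class_idx : List (Int × List Int)) : List (Int × List (Int × List (Int × List Int))) :=
  let vecs := leaf_idx_to_all_class_idx.map (·.2)
  match vecs with
  | [] => []   -- Python raises IndexError here; excluded by Pre_
  | v0 :: _ =>
    let L : Int := (v0.length : Int)
    let groups := (PySem.List.pyRange 0 L 1).foldl (fun acc st =>
      acc ++ [vecs.foldl (fun g v => groupStep g (PySem.List.pyGetD v st 0) v) []]) []
    (PySem.List.pyRange (L - 1) (-1) (-1)).map (fun tp =>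
      (tp, (PySem.List.pyRange 0 (tp + 1) 1).map (fun st =>
        (st, (PySem.List.pyGetD groups st []).map (fun kv =>
          (kv.1, PySem.List.dedup (kv.2.map (fun v => PySem.List.pyGetD v tp 0))))))))

-- ===== PRECONDITION & SPEC =====
-- Pre_ excludes inputs where the Python raises: the empty dict (IndexError reading the first
-- value) and dicts where some value list is shorter than the first one (IndexError indexing it);
-- duplicate-key association lists are excluded as well because they do not represent a Python dict.
def Pre_get_superclass_to_subclass (leaf_idx_to_all_class_idx : List (Int × List Int)) : Prop :=
  leaf_idx_to_all_class_idx ≠ [] ∧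
  (leaf_idx_to_all_class_idx.map Prod.fst).Nodup ∧
  ∀ q ∈ leaf_idx_to_all_class_idx, (leaf_idx_to_all_class_idx.headI).2.length ≤ q.2.length

instance (leaf_idx_to_all_class_idx : List (Int × List Int)) : Decidable (Pre_get_superclass_to_subclass leaf_idx_to_all_class_idx) := by unfold Pre_get_superclass_to_subclass; infer_instance

def pvWitness_get_superclass_to_subclass : (List (Int × List Int)) := [(0, [1, 2]), (1, [1, 3])]

def Spec_get_superclass_to_subclass (leaf_idx_to_all_class_idx : List (Int × List Int)) (out : List (Int × List (Int × List (Int × List Int)))) : Prop := out = get_superclass_to_subclass_alt leaf_idx_to_all_class_idx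
instance (leaf_idx_to_all_class_idx : List (Int × List Int)) (out : List (Int × List (Int × List (Int × List Int)))) : Decidable (Spec_get_superclass_to_subclass leaf_idx_to_all_class_idx out) := by unfold Spec_get_superclass_to_subclass; infer_instance

-- ===== CLAIM (what is proved, stated in full; the proofs are below) =====
def Claim_equal_get_superclass_to_subclass : Prop := ∀ (leaf_idx_to_all_class_idx : List (Int × List Int)), Dom_get_superclass_to_subclass leaf_idx_to_all_class_idx → Pre_get_superclass_to_subclass leaf_idx_to_all_class_idx → Spec_get_superclass_to_subclass leaf_idx_to_all_class_idx (get_superclass_to_subclass leaf_idx_to_all_class_idx)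

-- ===== LEMMAS AND PROOFS =====

-- the bucket A's pass produces for key k, as a function of the (super, sub) pair list
def keyF (pairs : List (Int × Int)) (k : Int) : List Int :=
  PySem.List.dedup (pairs.filterMap (fun p => if p.1 = k then some p.2 else none))

theorem dedup_snoc (l : List Int) (x : Int) :
    PySem.List.dedup (l ++ [x])
      = if x ∈ PySem.List.dedup l then PySem.List.dedup l else PySem.List.dedup l ++ [x] := by
  show PySem.Set.ofList (l ++ [x]) = _
  rw [PySem.Set.ofList_append]
  show PySem.Set.add (PySem.Set.ofList l) x = _
  simp [PySem.Set.add, PySem.Set.contains, PySem.List.dedup]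

theorem alGet_map_of_mem {β : Type} {ks : List Int} {a : Int} (F : Int → β) (h : a ∈ ks) :
    alGet (ks.map (fun k => (k, F k))) a = some (F a) := by
  induction ks with
  | nil => cases h
  | cons k r ih =>
    rw [List.mem_cons] at h
    by_cases hk : k = a
    · subst hk; simp [alGet]
    · have ha : a ∈ r := h.resolve_left (fun e => hk e.symm)
      simp [alGet, hk, ih ha]

theorem alGet_map_of_not_mem {β : Type} {ks : List Int} {a : Int} (F : Int → β) (h : a ∉ ks) :
    alGet (ks.map (fun k => (k, F k))) a = none := by
  induction ks with
  | nil => rfl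
  | cons k r ih =>
    simp only [List.mem_cons, not_or] at h
    have hk : ¬ k = a := fun e => h.1 e.symm
    simp [alGet, hk, ih h.2]

theorem alSet_map_nodup {β : Type} {ks : List Int} {a : Int} (F : Int → β) (v : β)
    (hnd : ks.Nodup) (h : a ∈ ks) :
    alSet (ks.map (fun k => (k, F k))) a v
      = ks.map (fun k => (k, if k = a then v else F k)) := by
  induction ks with
  | nil => cases h
  | cons k r ih =>
    rcases List.nodup_cons.mp hnd with ⟨hka, hr⟩
    rw [List.mem_cons] at h
    by_cases hk : k = a
    · subst hk
      have hmap : List.map (fun x => (x, if x = k then v else F x)) r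
          = List.map (fun x => (x, F x)) r :=
        List.map_congr_left (fun x hx => by
          have hxk : ¬ x = k := fun e => hka (e ▸ hx)
          simp [hxk])
      simp [alSet, hmap]
    · have ha : a ∈ r := h.resolve_left (fun e => hk e.symm)
      simp [alSet, hk, ih hr ha]

theorem filterMap_key_nil {pairs : List (Int × Int)} {a : Int}
    (h : a ∉ pairs.map Prod.fst) :
    pairs.filterMap (fun p => if p.1 = a then some p.2 else none) = [] := by
  induction pairs with
  | nil => rfl
  | cons p r ih =>
    simp only [List.map_cons, List.mem_cons, not_or] at h
    simp only [List.filterMap_cons]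
    rw [if_neg (fun e => h.1 e.symm)]
    exact ih h.2

theorem cellStepA_of_none {cell : List (Int × List Int)} {sup : Int} (sub : Int)
    (h : alGet cell sup = none) : cellStepA cell sup sub = cell ++ [(sup, [sub])] := by
  unfold cellStepA; rw [h]

theorem cellStepA_of_some {cell : List (Int × List Int)} {sup : Int} {b : List Int} (sub : Int)
    (h : alGet cell sup = some b) :
    cellStepA cell sup sub = if sub ∈ b then cell else alSet cell sup (b ++ [sub]) := by
  unfold cellStepA; rw [h]

theorem groupStep_of_none {g : List (Int × List (List Int))} {c : Int} (v : List Int)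
    (h : alGet g c = none) : groupStep g c v = g ++ [(c, [v])] := by
  unfold groupStep; rw [h]

theorem groupStep_of_some {g : List (Int × List (List Int))} {c : Int} {l : List (List Int)}
    (v : List Int) (h : alGet g c = some l) : groupStep g c v = alSet g c (l ++ [v]) := by
  unfold groupStep; rw [h]

theorem keyF_snoc (pairs : List (Int × Int)) (p : Int × Int) (k : Int) :
    keyF (pairs ++ [p]) k
      = if k = p.1 then (if p.2 ∈ keyF pairs p.1 then keyF pairs p.1 else keyF pairs p.1 ++ [p.2])
        else keyF pairs k := by
  unfold keyF
  rw [List.filterMap_append]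
  by_cases hk : k = p.1
  · subst hk
    rw [show List.filterMap (fun q => if q.1 = p.1 then some q.2 else none) [p] = [p.2] by
      simp]
    rw [dedup_snoc]
    simp
  · have hpk : ¬ p.1 = k := fun e => hk e.symm
    rw [show List.filterMap (fun q => if q.1 = k then some q.2 else none) [p] = [] by
      simp [hpk]]
    simp [hk]

theorem keyF_of_not_mem {pairs : List (Int × Int)} {a : Int}
    (h : a ∉ pairs.map Prod.fst) : keyF pairs a = [] := by
  unfold keyF
  rw [filterMap_key_nil h]
  rfl

-- A's single grouping pass over the (super, sub) pairs, characterised key-major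
theorem cell_core (pairs : List (Int × Int)) :
    pairs.foldl (fun c p => cellStepA c p.1 p.2) []
      = (PySem.List.dedup (pairs.map Prod.fst)).map (fun k => (k, keyF pairs k)) := by
  induction pairs using List.reverseRecOn with
  | nil => rfl
  | append_singleton pairs p ih =>
    rw [List.foldl_append, List.foldl_cons, List.foldl_nil, ih, List.map_append]
    simp only [List.map_cons, List.map_nil]
    rw [dedup_snoc]
    by_cases ha : p.1 ∈ PySem.List.dedup (pairs.map Prod.fst)
    · rw [if_pos ha]
      rw [cellStepA_of_some p.2 (alGet_map_of_mem (keyF pairs) ha)]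
      by_cases hb : p.2 ∈ keyF pairs p.1
      · simp only [hb, if_true]
        refine (List.map_congr_left (fun k hk => ?_)).symm
        rw [keyF_snoc]
        by_cases hka : k = p.1
        · subst hka; simp [hb]
        · simp [hka]
      · simp only [hb, if_false]
        rw [alSet_map_nodup (keyF pairs) (keyF pairs p.1 ++ [p.2]) (PySem.List.nodup_dedup _) ha]
        refine (List.map_congr_left (fun k hk => ?_)).symm
        rw [keyF_snoc]
        by_cases hka : k = p.1
        · subst hka; simp [hb]
        · simp [hka]
    · rw [if_neg ha]
      rw [cellStepA_of_none p.2 (alGet_map_of_not_mem (keyF pairs) ha), List.map_append]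
      refine congrArg₂ _ ?_ ?_
      · refine (List.map_congr_left (fun k hk => ?_)).symm
        rw [keyF_snoc]
        have hka : ¬ k = p.1 := fun e => ha (e ▸ hk)
        simp [hka]
      · simp only [List.map_cons, List.map_nil]
        rw [keyF_snoc, if_pos rfl,
            keyF_of_not_mem (fun h => ha ((PySem.List.mem_dedup _ _).mpr h))]
        rfl

-- B's stage-1 grouping pass, characterised key-major: each key's group is a filter
theorem group_core (vecs : List (List Int)) (st : Int) :
    vecs.foldl (fun g v => groupStep g (PySem.List.pyGetD v st 0) v) []
      = (PySem.List.dedup (vecs.map (fun v => PySem.List.pyGetD v st 0))).map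
          (fun k => (k, vecs.filter (fun v => PySem.List.pyGetD v st 0 == k))) := by
  induction vecs using List.reverseRecOn with
  | nil => rfl
  | append_singleton vecs v ih =>
    rw [List.foldl_append, List.foldl_cons, List.foldl_nil, ih, List.map_append]
    simp only [List.map_cons, List.map_nil]
    rw [dedup_snoc]
    have hfil : ∀ k, (vecs ++ [v]).filter (fun w => PySem.List.pyGetD w st 0 == k)
        = vecs.filter (fun w => PySem.List.pyGetD w st 0 == k)
          ++ (if PySem.List.pyGetD v st 0 = k then [v] else []) := by
      intro k
      rw [List.filter_append]
      by_cases hv : PySem.List.pyGetD v st 0 = k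
      · simp [hv]
      · have hb : (PySem.List.pyGetD v st 0 == k) = false := by simp [hv]
        simp [List.filter, hb]
        exact hv
    by_cases ha : PySem.List.pyGetD v st 0
        ∈ PySem.List.dedup (vecs.map (fun w => PySem.List.pyGetD w st 0))
    · rw [if_pos ha]
      rw [groupStep_of_some v
        (alGet_map_of_mem (fun k => vecs.filter (fun w => PySem.List.pyGetD w st 0 == k)) ha)]
      rw [alSet_map_nodup _ _ (PySem.List.nodup_dedup _) ha]
      refine (List.map_congr_left (fun k hk => ?_)).symm
      rw [hfil k]
      by_cases hka : k = PySem.List.pyGetD v st 0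
      · subst hka; simp
      · have : ¬ PySem.List.pyGetD v st 0 = k := fun e => hka e.symm
        simp [this, hka]
    · rw [if_neg ha]
      rw [groupStep_of_none v
        (alGet_map_of_not_mem (fun k => vecs.filter (fun w => PySem.List.pyGetD w st 0 == k)) ha)]
      rw [List.map_append]
      refine congrArg₂ _ ?_ ?_
      · refine (List.map_congr_left (fun k hk => ?_)).symm
        rw [hfil k]
        have hka : ¬ PySem.List.pyGetD v st 0 = k := fun e => ha (e ▸ hk)
        simp [hka]
      · simp only [List.map_cons, List.map_nil]
        have hnil : vecs.filter (fun w => PySem.List.pyGetD w st 0 == PySem.List.pyGetD v st 0)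
            = [] := by
          rw [List.filter_eq_nil_iff]
          intro w hw
          simp only [beq_iff_eq]
          exact fun e => ha ((PySem.List.mem_dedup _ _).mpr (e ▸ List.mem_map_of_mem hw))
        rw [hfil, hnil, if_pos rfl]
        rfl

-- mapping the subclass column over a key's group = filtering the zipped pair list by that key
theorem group_bucket (vecs : List (List Int)) (st tp k : Int) :
    (vecs.filter (fun v => PySem.List.pyGetD v st 0 == k)).map (fun v => PySem.List.pyGetD v tp 0)
      = (vecs.map (fun v => (PySem.List.pyGetD v st 0, PySem.List.pyGetD v tp 0))).filterMap
          (fun q => if q.1 = k then some q.2 else none) := by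
  induction vecs with
  | nil => rfl
  | cons v r ih =>
    simp only [List.filter_cons, List.map_cons, List.filterMap_cons]
    by_cases hv : PySem.List.pyGetD v st 0 = k
    · simp [hv, ih]
    · simp [hv, ih]

-- one cell of A's output, rewritten to B's assembled form
theorem cell_eq (vecs : List (List Int)) (st tp : Int) :
    vecs.foldl (fun cell v =>
        cellStepA cell (PySem.List.pyGetD v st 0) (PySem.List.pyGetD v tp 0)) []
      = (vecs.foldl (fun g v => groupStep g (PySem.List.pyGetD v st 0) v) []).map
          (fun kv => (kv.1, PySem.List.dedup (kv.2.map (fun v => PySem.List.pyGetD v tp 0)))) := by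
  have h := cell_core (vecs.map (fun v => (PySem.List.pyGetD v st 0, PySem.List.pyGetD v tp 0)))
  rw [List.foldl_map] at h
  rw [h, group_core, List.map_map, List.map_map]
  have hkeys : vecs.map (Prod.fst ∘ fun v => (PySem.List.pyGetD v st 0, PySem.List.pyGetD v tp 0))
      = vecs.map (fun v => PySem.List.pyGetD v st 0) :=
    List.map_congr_left (fun v _ => rfl)
  rw [hkeys]
  refine List.map_congr_left (fun k hk => ?_)
  simp only [Function.comp_def]
  rw [group_bucket]
  rfl

-- ===== VERDICT (by name: the statement is the Claim_ definition above) =====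
theorem get_superclass_to_subclass_spec : Claim_equal_get_superclass_to_subclass := by
  intro l _ _
  unfold Spec_get_superclass_to_subclass get_superclass_to_subclass get_superclass_to_subclass_alt
  cases l with
  | nil => rfl
  | cons p rest =>
    simp only [List.map_cons]
    rw [PySem.List.foldl_append_singleton_eq_map, PySem.List.foldl_append_singleton_eq_map]
    simp only [List.nil_append]
    refine List.map_congr_left (fun tp htp => ?_)
    have htpb : 0 ≤ tp ∧ tp ≤ (p.2.length : Int) - 1 := by
      have := (PySem.List.mem_pyRange_neg_one).mp htp
      omega
    refine congrArg _ ?_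
    rw [PySem.List.foldl_append_singleton_eq_map]
    simp only [List.nil_append]
    refine List.map_congr_left (fun st hst => ?_)
    have hstb : 0 ≤ st ∧ st ≤ tp := by
      have := (PySem.List.mem_pyRange_one).mp hst
      omega
    refine congrArg _ ?_
    rw [PySem.List.pyGetD_map_pyRange_of_nonneg _ ((p.2.length : Int)) st [] hstb.1 (by omega)]
    rw [show ((p.1, p.2) :: rest).foldl (fun cell q =>
          cellStepA cell (PySem.List.pyGetD q.2 st 0) (PySem.List.pyGetD q.2 tp 0)) []
        = (((p.1, p.2) :: rest).map (·.2)).foldl (fun cell v =>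
          cellStepA cell (PySem.List.pyGetD v st 0) (PySem.List.pyGetD v tp 0)) [] by
      rw [List.foldl_map]]
    simp only [List.map_cons]
    rw [cell_eq (p.2 :: rest.map (·.2)) st tp]
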